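-- pv_equiv track=rewrite | github.com/andrew-hardwick/advent-of-code | 2015/19/p1.py | get_unique_molecules
-- ===== SOURCE A (Python) =====
-- def get_unique_molecules(
--         molecule,
--         replacements):
--     unique_molecules = set()
--
--     for key, repl in replacements:
--         split_by_key = molecule.split(key)
--
--         for i in range(1, len(split_by_key)):
--             left_hand = key.join(split_by_key[:i])
--             right_hand = key.join(split_by_key[i:])
--
--             candidate = left_hand + repl + right_hand
--
--             unique_molecules.add(candidate)
--
--     return unique_molecules
-- ===== SOURCE B (Python) =====
-- def get_unique_molecules(
--         molecule,
--         replacements):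
--     unique_molecules = set()
--
--     for key, repl in replacements:
--         start = 0
--         while True:
--             pos = molecule.find(key, start)
--             if pos == -1:
--                 break
--             unique_molecules.add(molecule[:pos] + repl + molecule[pos + len(key):])
--             start = pos + len(key)
--
--     return unique_molecules
-- ===== Notes on version B (the rewrite author's own statement) =====
-- stated objective: alternative
-- what changed: Replaces the split/join segment decomposition (building each variant by re-joining slices of molecule.split(key)) with a direct positional scan: str.find with a moving cursor locates each non-overlapping occurrence and the variant is built by two slices around it, so no segment list is ever materialised.
-- outside the precondition, e.g. on get_unique_molecules('HOH', [('', 'X')]): A raises ValueError, B does not finish within the time limit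
import Mathlib
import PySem

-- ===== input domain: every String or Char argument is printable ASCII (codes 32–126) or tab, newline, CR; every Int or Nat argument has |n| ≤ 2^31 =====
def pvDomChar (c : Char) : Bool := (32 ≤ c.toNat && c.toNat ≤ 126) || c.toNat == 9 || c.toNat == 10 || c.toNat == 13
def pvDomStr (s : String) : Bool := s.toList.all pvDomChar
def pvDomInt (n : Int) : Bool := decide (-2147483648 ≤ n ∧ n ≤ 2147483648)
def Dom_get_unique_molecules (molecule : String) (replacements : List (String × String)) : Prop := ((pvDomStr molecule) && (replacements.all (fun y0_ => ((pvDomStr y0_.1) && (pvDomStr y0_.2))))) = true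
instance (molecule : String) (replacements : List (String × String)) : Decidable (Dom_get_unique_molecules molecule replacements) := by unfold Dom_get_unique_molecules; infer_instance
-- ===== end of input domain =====

-- B replaces A's split/join segment decomposition by a positional str.find scan with a moving
-- cursor (objective: alternative); equivalence is about the return value (neither version mutates).

-- ===== PORT A =====
-- Strings are carried as their char lists (PySem.Chars); the set is wrapped back to String at the end.
def get_unique_molecules (molecule : String) (replacements : List (String × String)) : List String :=
  (replacements.foldl (fun (um : PySem.Set (List Char)) kv =>
      match PySem.Chars.split? molecule.toList kv.1.toList with
      | none => um          -- key = "": Python raises ValueError here (excluded by Pre_)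
      | some split_by_key =>
          (PySem.List.pyRange 1 (split_by_key.length : Int) 1).foldl (fun um i =>
            let left_hand := PySem.Chars.join kv.1.toList (PySem.List.slice split_by_key none (some i))
            let right_hand := PySem.Chars.join kv.1.toList (PySem.List.slice split_by_key (some i) none)
            PySem.Set.add um (left_hand ++ kv.2.toList ++ right_hand)) um)
    PySem.Set.empty).map String.ofList

-- ===== PORT B =====
-- the "while True: pos = molecule.find(key, start)" loop of Source B; the fuel argument (length+1)
-- only makes the recursion structural — under Pre_ the cursor strictly increases each iteration,
-- so the fuel is never exhausted
def pvFindLoop (m k r : List Char) (um : PySem.Set (List Char)) (start : Int) : Nat → PySem.Set (List Char)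
  | 0 => um
  | fuel+1 =>
    let pos := PySem.Chars.findFrom m k start none
    if pos = -1 then um
    else pvFindLoop m k r
      (PySem.Set.add um (PySem.List.slice m none (some pos) ++ r ++
        PySem.List.slice m (some (pos + (k.length : Int))) none))
      (pos + (k.length : Int)) fuel

def get_unique_molecules_alt (molecule : String) (replacements : List (String × String)) : List String :=
  (replacements.foldl (fun (um : PySem.Set (List Char)) kv =>
      pvFindLoop molecule.toList kv.1.toList kv.2.toList um 0 (molecule.toList.length + 1))
    PySem.Set.empty).map String.ofList

-- ===== PRECONDITION & SPEC =====
-- Pre_ excludes an empty replacement key: there A's molecule.split('') raises ValueError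
-- (and B's find loop never terminates).
def Pre_get_unique_molecules (molecule : String) (replacements : List (String × String)) : Prop :=
  ∀ p ∈ replacements, p.1 ≠ ""
instance (molecule : String) (replacements : List (String × String)) : Decidable (Pre_get_unique_molecules molecule replacements) := by unfold Pre_get_unique_molecules; infer_instance

def pvWitness_get_unique_molecules : String × (List (String × String)) := ("HOH", [("H", "HO"), ("O", "OO")])

def Spec_get_unique_molecules (molecule : String) (replacements : List (String × String)) (out : List String) : Prop := out = get_unique_molecules_alt molecule replacements
instance (molecule : String) (replacements : List (String × String)) (out : List String) : Decidable (Spec_get_unique_molecules molecule replacements out) := by unfold Spec_get_unique_molecules; infer_instance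

-- ===== CLAIM (what is proved, stated in full; the proofs are below) =====
def Claim_equal_get_unique_molecules : Prop := ∀ (molecule : String) (replacements : List (String × String)), Dom_get_unique_molecules molecule replacements → Pre_get_unique_molecules molecule replacements → Spec_get_unique_molecules molecule replacements (get_unique_molecules molecule replacements)

-- ===== LEMMAS AND PROOFS =====
def pvConsHead (p : List Char) : List (List Char) → List (List Char)
  | [] => [p]
  | x :: xs => (p ++ x) :: xs
def pvSpl (k l : List Char) : List (List Char) := PySem.Chars.splitOn l k

theorem pvConsHead_consHead (p q : List Char) (X : List (List Char)) :
    pvConsHead p (pvConsHead q X) = pvConsHead (p ++ q) X := by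
  cases X <;> simp [pvConsHead]

theorem pvGo_eq (k : List Char) (hk : k ≠ []) :
    ∀ n, ∀ l : List Char, l.length ≤ n → ∀ fuel, l.length ≤ fuel → ∀ cur acc,
      PySem.Chars.splitOn.go k fuel l cur acc = acc.reverse ++ pvConsHead cur.reverse (pvSpl k l) := by
  intro n
  induction n with
  | zero =>
    intro l hl fuel hf cur acc
    have hl0 : l = [] := List.length_eq_zero_iff.mp (by omega)
    subst hl0
    cases fuel with
    | zero => simp [PySem.Chars.splitOn.go, pvSpl, PySem.Chars.splitOn, pvConsHead]
    | succ f =>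
      show (cur.reverse :: acc).reverse = _
      have h0 : pvSpl k [] = [[]] := rfl
      simp [h0, pvConsHead]
  | succ n ih =>
    intro l hl fuel hf cur acc
    cases l with
    | nil =>
      cases fuel with
      | zero => simp [PySem.Chars.splitOn.go, pvSpl, PySem.Chars.splitOn, pvConsHead]
      | succ f =>
        show (cur.reverse :: acc).reverse = _
        have h0 : pvSpl k [] = [[]] := rfl
        simp [h0, pvConsHead]
    | cons c rest =>
      have hkl : k.length ≠ 0 := by
        intro h; exact hk (List.length_eq_zero_iff.mp h)
      cases fuel with
      | zero => simp at hf
      | succ f =>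
        rw [show PySem.Chars.splitOn.go k (f+1) (c::rest) cur acc =
              if k.isPrefixOf (c::rest) then
                PySem.Chars.splitOn.go k f (List.drop k.length (c::rest)) [] (cur.reverse :: acc)
              else PySem.Chars.splitOn.go k f rest (c :: cur) acc from rfl]
        -- expansion of pvSpl k (c::rest) one step
        have hspl : pvSpl k (c::rest) =
            if k.isPrefixOf (c::rest) then
              PySem.Chars.splitOn.go k ((c::rest).length) (List.drop k.length (c::rest)) [] [[]]
            else PySem.Chars.splitOn.go k ((c::rest).length) rest [c] [] := by
          rw [show pvSpl k (c::rest) = PySem.Chars.splitOn.go k ((c::rest).length + 1) (c::rest) [] [] from rfl]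
          rw [show PySem.Chars.splitOn.go k ((c::rest).length + 1) (c::rest) [] [] =
              if k.isPrefixOf (c::rest) then
                PySem.Chars.splitOn.go k ((c::rest).length) (List.drop k.length (c::rest)) [] (([] : List Char).reverse :: [])
              else PySem.Chars.splitOn.go k ((c::rest).length) rest (c :: []) [] from rfl]
          simp
        by_cases hp : k.isPrefixOf (c::rest)
        · simp only [hp, if_true] at hspl ⊢
          have hdl : (List.drop k.length (c::rest)).length ≤ n := by
            simp only [List.length_drop, List.length_cons] at *
            omega
          rw [ih _ hdl f (by simp only [List.length_drop] at *; omega) [] (cur.reverse :: acc)]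
          rw [hspl, ih _ hdl ((c::rest).length) (by simp only [List.length_drop]; omega) [] [[]]]
          simp
          cases pvSpl k (List.drop k.length (c :: rest)) <;> simp [pvConsHead]
        · simp only [hp] at hspl ⊢
          have hrl : rest.length ≤ n := by simp at hl; omega
          rw [ih _ hrl f (by simp at hf; omega) (c :: cur) acc]
          rw [hspl, ih _ hrl ((c::rest).length) (by simp) [c] []]
          simp [pvConsHead_consHead]

theorem pvSpl_nil (k : List Char) : pvSpl k [] = [[]] := rfl

theorem pvSpl_ne_nil (k : List Char) (hk : k ≠ []) (l : List Char) : pvSpl k l ≠ [] := by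
  have h2 : pvSpl k l = pvConsHead [] (pvSpl k l) := by
    simpa [pvSpl, PySem.Chars.splitOn] using
      pvGo_eq k hk l.length l le_rfl (l.length + 1) (by omega) [] []
  rw [h2]; cases pvSpl k l <;> simp [pvConsHead]

theorem pvSpl_eq_consHead (k : List Char) (hk : k ≠ []) (l : List Char) :
    pvConsHead [] (pvSpl k l) = pvSpl k l := by
  obtain ⟨x, xs, h⟩ : ∃ x xs, pvSpl k l = x :: xs := by
    cases h : pvSpl k l with
    | nil => exact absurd h (pvSpl_ne_nil k hk l)
    | cons x xs => exact ⟨x, xs, rfl⟩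
  simp [h, pvConsHead]

theorem pvSpl_cons_pos (k : List Char) (hk : k ≠ []) (c : Char) (rest : List Char)
    (hp : k.isPrefixOf (c :: rest)) :
    pvSpl k (c :: rest) = [] :: pvSpl k (List.drop k.length (c :: rest)) := by
  rw [show pvSpl k (c::rest) =
      PySem.Chars.splitOn.go k ((c::rest).length + 1) (c::rest) [] [] from rfl]
  rw [show PySem.Chars.splitOn.go k ((c::rest).length + 1) (c::rest) [] [] =
      if k.isPrefixOf (c::rest) then
        PySem.Chars.splitOn.go k ((c::rest).length) (List.drop k.length (c::rest)) [] (([] : List Char).reverse :: [])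
      else PySem.Chars.splitOn.go k ((c::rest).length) rest (c :: []) [] from rfl]
  rw [if_pos hp]
  rw [pvGo_eq k hk (List.drop k.length (c::rest)).length _ le_rfl _ (by simp) [] _]
  simp [pvSpl_eq_consHead k hk]

theorem pvSpl_cons_neg (k : List Char) (hk : k ≠ []) (c : Char) (rest : List Char)
    (hp : ¬ k.isPrefixOf (c :: rest)) :
    pvSpl k (c :: rest) = pvConsHead [c] (pvSpl k rest) := by
  rw [show pvSpl k (c::rest) =
      PySem.Chars.splitOn.go k ((c::rest).length + 1) (c::rest) [] [] from rfl]
  rw [show PySem.Chars.splitOn.go k ((c::rest).length + 1) (c::rest) [] [] =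
      if k.isPrefixOf (c::rest) then
        PySem.Chars.splitOn.go k ((c::rest).length) (List.drop k.length (c::rest)) [] (([] : List Char).reverse :: [])
      else PySem.Chars.splitOn.go k ((c::rest).length) rest (c :: []) [] from rfl]
  rw [if_neg hp]
  rw [pvGo_eq k hk rest.length _ le_rfl _ (by simp) _ _]
  simp

theorem pvJoin_cons_append (k a b : List Char) (xs : List (List Char)) :
    PySem.Chars.join k ((a ++ b) :: xs) = a ++ PySem.Chars.join k (b :: xs) := by
  cases xs with
  | nil => simp [PySem.Chars.join_singleton]
  | cons q t => simp [PySem.Chars.join_cons_cons]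

theorem pvJoin_cons_of_ne_nil (k p : List Char) (xs : List (List Char)) (h : xs ≠ []) :
    PySem.Chars.join k (p :: xs) = p ++ k ++ PySem.Chars.join k xs := by
  cases xs with
  | nil => exact absurd rfl h
  | cons q t => simp [PySem.Chars.join_cons_cons]

theorem pvJoin_spl (k : List Char) (hk : k ≠ []) :
    ∀ n, ∀ m : List Char, m.length ≤ n → PySem.Chars.join k (pvSpl k m) = m := by
  intro n
  induction n with
  | zero =>
    intro m hm
    have : m = [] := List.length_eq_zero_iff.mp (by omega)
    subst this
    simp [pvSpl_nil, PySem.Chars.join_singleton]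
  | succ n ih =>
    intro m hm
    cases m with
    | nil => simp [pvSpl_nil, PySem.Chars.join_singleton]
    | cons c rest =>
      by_cases hp : k.isPrefixOf (c :: rest)
      · rw [pvSpl_cons_pos k hk c rest hp]
        rw [pvJoin_cons_of_ne_nil k _ _ (pvSpl_ne_nil k hk _)]
        have hk1 : 1 ≤ k.length := by
          cases k with | nil => exact absurd rfl hk | cons a b => simp
        rw [ih _ (by simp at hm ⊢; omega)]
        have hpre : k <+: (c :: rest) := List.isPrefixOf_iff_prefix.mp hp
        obtain ⟨t, ht⟩ := hpre
        rw [← ht, List.drop_left]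
        simp
      · rw [pvSpl_cons_neg k hk c rest hp]
        obtain ⟨q, qs, h⟩ : ∃ q qs, pvSpl k rest = q :: qs := by
          cases h : pvSpl k rest with
          | nil => exact absurd h (pvSpl_ne_nil k hk rest)
          | cons q qs => exact ⟨q, qs, rfl⟩
        have := ih rest (by simp at hm; omega)
        rw [h] at this ⊢
        show PySem.Chars.join k (([c] ++ q) :: qs) = c :: rest
        rw [pvJoin_cons_append]
        simp [this]

def pvCands (k r : List Char) (pre : List Char) : List Char → List (List Char)
  | [] => []
  | c :: rest =>
    if _h : k.isPrefixOf (c :: rest) ∧ k ≠ [] then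
      (pre ++ r ++ List.drop k.length (c :: rest)) ::
        pvCands k r (pre ++ k) (List.drop k.length (c :: rest))
    else
      pvCands k r (pre ++ [c]) rest
  termination_by m => m.length
  decreasing_by
    · have : k.length ≠ 0 := by
        intro h0; exact _h.2 (List.length_eq_zero_iff.mp h0)
      simp only [List.length_drop, List.length_cons]
      omega
    · simp

theorem pvCands_nil (k r pre : List Char) : pvCands k r pre [] = [] := by
  simp [pvCands]

theorem pvCands_cons_pos (k r pre : List Char) (hk : k ≠ []) (c : Char) (rest : List Char)
    (hp : k.isPrefixOf (c :: rest)) :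
    pvCands k r pre (c :: rest) =
      (pre ++ r ++ List.drop k.length (c :: rest)) ::
        pvCands k r (pre ++ k) (List.drop k.length (c :: rest)) := by
  rw [pvCands]; simp [hp, hk]

theorem pvCands_cons_neg (k r pre : List Char) (c : Char) (rest : List Char)
    (hp : ¬ k.isPrefixOf (c :: rest)) :
    pvCands k r pre (c :: rest) = pvCands k r (pre ++ [c]) rest := by
  rw [pvCands]; simp [hp]

theorem pvCands_pre (k r : List Char) (hk : k ≠ []) :
    ∀ n, ∀ m : List Char, m.length ≤ n → ∀ pre,
      pvCands k r pre m = (pvCands k r [] m).map (pre ++ ·) := by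
  intro n
  induction n with
  | zero =>
    intro m hm pre
    have : m = [] := List.length_eq_zero_iff.mp (by omega)
    subst this; simp [pvCands_nil]
  | succ n ih =>
    intro m hm pre
    have hk1 : 1 ≤ k.length := by
      cases k with | nil => exact absurd rfl hk | cons a b => simp
    cases m with
    | nil => simp [pvCands_nil]
    | cons c rest =>
      by_cases hp : k.isPrefixOf (c :: rest)
      · rw [pvCands_cons_pos k r pre hk c rest hp, pvCands_cons_pos k r [] hk c rest hp]
        have hdl : (List.drop k.length (c :: rest)).length ≤ n := by
          simp at hm ⊢; omega
        rw [ih _ hdl (pre ++ k), ih _ hdl ([] ++ k)]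
        simp [List.map_map, Function.comp_def, List.append_assoc]
      · rw [pvCands_cons_neg k r pre c rest hp, pvCands_cons_neg k r [] c rest hp]
        have hrl : rest.length ≤ n := by simp at hm; omega
        rw [ih _ hrl (pre ++ [c]), ih _ hrl ([] ++ [c])]
        simp [List.map_map, Function.comp_def, List.append_assoc]

theorem pvA_eq (k r : List Char) (hk : k ≠ []) :
    ∀ n, ∀ m : List Char, m.length ≤ n →
      (List.range ((pvSpl k m).length - 1)).map
        (fun i => PySem.Chars.join k (List.take (i+1) (pvSpl k m)) ++ r ++
                  PySem.Chars.join k (List.drop (i+1) (pvSpl k m)))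
      = pvCands k r [] m := by
  intro n
  induction n with
  | zero =>
    intro m hm
    have : m = [] := List.length_eq_zero_iff.mp (by omega)
    subst this
    simp [pvSpl_nil, pvCands_nil]
  | succ n ih =>
    intro m hm
    have hk1 : 1 ≤ k.length := by
      cases k with | nil => exact absurd rfl hk | cons a b => simp
    cases m with
    | nil => simp [pvSpl_nil, pvCands_nil]
    | cons c rest =>
      by_cases hp : k.isPrefixOf (c :: rest)
      · rw [pvSpl_cons_pos k hk c rest hp]
        have hdl : (List.drop k.length (c :: rest)).length ≤ n := by
          simp at hm ⊢; omega
        obtain ⟨q, qs, ht⟩ : ∃ q qs, pvSpl k (List.drop k.length (c :: rest)) = q :: qs := by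
          cases h : pvSpl k (List.drop k.length (c :: rest)) with
          | nil => exact absurd h (pvSpl_ne_nil k hk _)
          | cons q qs => exact ⟨q, qs, rfl⟩
        have hlen : ([] :: pvSpl k (List.drop k.length (c :: rest))).length - 1 = qs.length + 1 := by
          simp [ht]
        rw [hlen, List.range_succ_eq_map, List.map_cons, List.map_map]
        have hhead : PySem.Chars.join k (List.take (0+1) ([] :: pvSpl k (List.drop k.length (c :: rest)))) ++ r ++
            PySem.Chars.join k (List.drop (0+1) ([] :: pvSpl k (List.drop k.length (c :: rest)))) =
            [] ++ r ++ List.drop k.length (c :: rest) := by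
          simp only [List.take_succ_cons, List.take_zero, List.drop_succ_cons, List.drop_zero]
          rw [PySem.Chars.join_singleton, pvJoin_spl k hk n _ hdl]
        have htail : (List.range (qs.length + 1 - 1)).map
            ((fun i => PySem.Chars.join k (List.take (i+1) ([] :: pvSpl k (List.drop k.length (c :: rest)))) ++ r ++
                  PySem.Chars.join k (List.drop (i+1) ([] :: pvSpl k (List.drop k.length (c :: rest))))) ∘ Nat.succ)
            = (pvCands k r [] (List.drop k.length (c :: rest))).map (k ++ ·) := by
          rw [← ih _ hdl, List.map_map]
          rw [show (pvSpl k (List.drop k.length (c :: rest))).length - 1 = qs.length + 1 - 1 from by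
            simp [ht]]
          apply List.map_congr_left
          intro j hj
          have hjlt : j < qs.length := by
            simpa [ht] using List.mem_range.mp hj
          simp only [Function.comp_apply]
          have htk : List.take (Nat.succ j + 1) ([] :: pvSpl k (List.drop k.length (c :: rest)))
              = [] :: List.take (j+1) (pvSpl k (List.drop k.length (c :: rest))) := by
            simp [List.take_succ_cons]
          have hne : List.take (j+1) (pvSpl k (List.drop k.length (c :: rest))) ≠ [] := by
            rw [ht]; simp
          rw [htk, pvJoin_cons_of_ne_nil k _ _ hne]
          simp [List.append_assoc]
        rw [hhead]
        rw [show qs.length + 1 - 1 = qs.length from rfl] at htail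
        have hrange : (List.range (qs.length + 1 - 1)) = List.range qs.length := rfl
        rw [htail]
        rw [pvCands_cons_pos k r [] hk c rest hp]
        rw [pvCands_pre k r hk n _ hdl ([] ++ k)]
        simp
      · rw [pvSpl_cons_neg k hk c rest hp]
        have hrl : rest.length ≤ n := by simp at hm; omega
        obtain ⟨q, qs, ht⟩ : ∃ q qs, pvSpl k rest = q :: qs := by
          cases h : pvSpl k rest with
          | nil => exact absurd h (pvSpl_ne_nil k hk rest)
          | cons q qs => exact ⟨q, qs, rfl⟩
        rw [ht]
        show (List.range (((([c] ++ q) :: qs)).length - 1)).map _ = _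
        rw [pvCands_cons_neg k r [] c rest hp]
        rw [pvCands_pre k r hk n _ hrl ([] ++ [c])]
        rw [← ih _ hrl, ht]
        simp only [List.length_cons, Nat.add_sub_cancel, List.map_map]
        apply List.map_congr_left
        intro j hj
        simp only [Function.comp_apply]
        rw [show pvConsHead [c] (q :: qs) = ([c] ++ q) :: qs from rfl]
        have htk : List.take (j+1) ((([c] ++ q)) :: qs) = ([c] ++ q) :: List.take j qs := by
          simp [List.take_succ_cons]
        rw [htk, pvJoin_cons_append]
        simp [List.take_succ_cons, List.drop_succ_cons, List.append_assoc]

theorem pvFind_zero_of_prefix (m k : List Char) (h : k <+: m) : PySem.Chars.find m k = 0 := by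
  have hin : k <:+: m := h.isInfix
  have h0 : 0 ≤ PySem.Chars.find m k := (PySem.Chars.find_nonneg_iff m k).mpr hin
  have hs := PySem.Chars.find_spec h0
  by_contra hne
  have hlt : 0 < (PySem.Chars.find m k).toNat := by omega
  exact hs.2 0 hlt (by simpa using h)

theorem pvFind_cons_of_not_prefix (c : Char) (rest k : List Char) (h : ¬ k <+: (c :: rest)) :
    PySem.Chars.find (c :: rest) k =
      if PySem.Chars.find rest k = -1 then -1 else 1 + PySem.Chars.find rest k := by
  by_cases hr : PySem.Chars.find rest k = -1
  · simp only [hr, if_true]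
    rw [PySem.Chars.find_eq_neg_one_iff]
    intro hin
    obtain ⟨j, hj⟩ := (PySem.Chars.exists_prefix_drop_iff_isIn k (c :: rest)).mpr
      ((PySem.Chars.isIn_iff_infix k (c :: rest)).mpr hin)
    cases j with
    | zero => exact h (by simpa using hj)
    | succ j' =>
      have hj2 : k <+: List.drop j' rest := by simpa using hj
      have hin' : k <:+: rest := (PySem.Chars.isIn_iff_infix k rest).mp
        ((PySem.Chars.exists_prefix_drop_iff_isIn k rest).mp ⟨j', hj2⟩)
      rw [PySem.Chars.find_eq_neg_one_iff] at hr
      exact hr hin'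
  · simp only [hr, if_false]
    have h0 : 0 ≤ PySem.Chars.find rest k := by
      have := PySem.Chars.neg_one_le_find rest k; omega
    have hs := PySem.Chars.find_spec h0
    have hpre : k <+: List.drop ((PySem.Chars.find rest k).toNat + 1) (c :: rest) := by
      simpa using hs.1
    have hin : k <:+: (c :: rest) := (PySem.Chars.isIn_iff_infix k (c :: rest)).mp
      ((PySem.Chars.exists_prefix_drop_iff_isIn k (c :: rest)).mp ⟨(PySem.Chars.find rest k).toNat + 1, hpre⟩)
    have h0' : 0 ≤ PySem.Chars.find (c :: rest) k := (PySem.Chars.find_nonneg_iff _ _).mpr hin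
    have hs' := PySem.Chars.find_spec h0'
    have hj0 : (PySem.Chars.find (c :: rest) k).toNat ≠ 0 := by
      intro h0''
      apply h
      have h1 := hs'.1
      rw [h0''] at h1
      simpa using h1
    have hle : (PySem.Chars.find (c :: rest) k).toNat ≤ (PySem.Chars.find rest k).toNat + 1 := by
      by_contra hgt
      exact hs'.2 ((PySem.Chars.find rest k).toNat + 1) (by omega) hpre
    have hge : (PySem.Chars.find rest k).toNat + 1 ≤ (PySem.Chars.find (c :: rest) k).toNat := by
      by_contra hlt
      have hpre' : k <+: List.drop ((PySem.Chars.find (c :: rest) k).toNat - 1) rest := by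
        obtain ⟨j0, hj0'⟩ : ∃ j0, (PySem.Chars.find (c :: rest) k).toNat = j0 + 1 :=
          ⟨(PySem.Chars.find (c :: rest) k).toNat - 1, by omega⟩
        have h1 := hs'.1
        rw [hj0'] at h1
        simpa [hj0'] using h1
      exact hs.2 _ (by omega) hpre'
    omega

theorem pvCands_find (k r : List Char) (hk : k ≠ []) :
    ∀ l pre, pvCands k r pre l =
      if PySem.Chars.find l k = -1 then []
      else (pre ++ List.take (PySem.Chars.find l k).toNat l ++ r ++
              List.drop ((PySem.Chars.find l k).toNat + k.length) l) ::
           pvCands k r (pre ++ List.take (PySem.Chars.find l k).toNat l ++ k)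
             (List.drop ((PySem.Chars.find l k).toNat + k.length) l) := by
  intro l
  induction l with
  | nil =>
    intro pre
    have hf : PySem.Chars.find [] k = -1 := by
      rw [PySem.Chars.find_eq_neg_one_iff]
      intro hin
      exact hk (by simpa using hin)
    simp [hf, pvCands_nil]
  | cons c rest ihl =>
    intro pre
    by_cases hp : k <+: (c :: rest)
    · have hpb : k.isPrefixOf (c :: rest) := List.isPrefixOf_iff_prefix.mpr hp
      rw [pvCands_cons_pos k r pre hk c rest hpb]
      rw [pvFind_zero_of_prefix _ _ hp]
      norm_num
    · have hpb : ¬ k.isPrefixOf (c :: rest) = true := fun hb => hp (List.isPrefixOf_iff_prefix.mp hb)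
      rw [pvCands_cons_neg k r pre c rest hpb, ihl (pre ++ [c])]
      rw [pvFind_cons_of_not_prefix c rest k hp]
      by_cases hr : PySem.Chars.find rest k = -1
      · simp [hr]
      · have h0 : 0 ≤ PySem.Chars.find rest k := by
          have := PySem.Chars.neg_one_le_find rest k; omega
        have hne : ¬ (1 + PySem.Chars.find rest k = -1) := by omega
        simp only [hr, hne, if_false]
        have htn : (1 + PySem.Chars.find rest k).toNat = (PySem.Chars.find rest k).toNat + 1 := by
          omega
        rw [htn]
        have e1 : List.take ((PySem.Chars.find rest k).toNat + 1) (c :: rest)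
            = c :: List.take (PySem.Chars.find rest k).toNat rest := by
          simp [List.take_succ_cons]
        have e2 : List.drop ((PySem.Chars.find rest k).toNat + 1 + k.length) (c :: rest)
            = List.drop ((PySem.Chars.find rest k).toNat + k.length) rest := by
          rw [show (PySem.Chars.find rest k).toNat + 1 + k.length
              = ((PySem.Chars.find rest k).toNat + k.length) + 1 from by omega]
          simp [List.drop_succ_cons]
        rw [e1, e2]
        simp [List.append_assoc]


theorem pvFindLoop_eq (m k r : List Char) (hk : k ≠ []) :
    ∀ fuel (start : Nat) um, start ≤ m.length → m.length - start < fuel →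
      pvFindLoop m k r um (start : Int) fuel =
        List.foldl PySem.Set.add um (pvCands k r (List.take start m) (List.drop start m)) := by
  intro fuel
  induction fuel with
  | zero => intro start um h1 h2; omega
  | succ fuel ih =>
    intro start um h1 h2
    have hk1 : 1 ≤ k.length := by
      cases k with | nil => exact absurd rfl hk | cons a b => simp
    have hunf : pvFindLoop m k r um (start : Int) (fuel+1) =
        (if PySem.Chars.findFrom m k (start : Int) none = -1 then um
         else pvFindLoop m k r
          (PySem.Set.add um (PySem.List.slice m none (some (PySem.Chars.findFrom m k (start : Int) none)) ++ r ++
            PySem.List.slice m (some (PySem.Chars.findFrom m k (start : Int) none + (k.length : Int))) none))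
          (PySem.Chars.findFrom m k (start : Int) none + (k.length : Int)) fuel) := rfl
    rw [hunf, PySem.Chars.findFrom_natCast m k start h1]
    rw [pvCands_find k r hk (List.drop start m) (List.take start m)]
    by_cases hfind : PySem.Chars.find (List.drop start m) k = -1
    · simp [hfind]
    · have h0 : 0 ≤ PySem.Chars.find (List.drop start m) k := by
        have := PySem.Chars.neg_one_le_find (List.drop start m) k; omega
      have hs := PySem.Chars.find_spec h0
      have hjlen : (PySem.Chars.find (List.drop start m) k).toNat ≤ m.length - start := by
        have := PySem.Chars.find_le_length (List.drop start m) k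
        simp at this; omega
      -- the match starts at start + j and k fits there
      have hpre : k <+: List.drop (start + (PySem.Chars.find (List.drop start m) k).toNat) m := by
        have h1' := hs.1
        rw [List.drop_drop] at h1'
        exact h1'
      have hkfit : start + (PySem.Chars.find (List.drop start m) k).toNat + k.length ≤ m.length := by
        obtain ⟨t, ht⟩ := hpre
        have := congrArg List.length ht
        simp at this
        omega
      simp only [hfind, if_false]
      have hne2 : ¬ ((start : Int) + PySem.Chars.find (List.drop start m) k = -1) := by omega
      rw [if_neg hne2]
      -- the slices are plain take/drop
      rw [PySem.List.slice_to m (by omega : (0:Int) ≤ (start : Int) + PySem.Chars.find (List.drop start m) k)]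
      rw [PySem.List.slice_from m (by omega : (0:Int) ≤ (start : Int) + PySem.Chars.find (List.drop start m) k + (k.length : Int))]
      have et : ((start : Int) + PySem.Chars.find (List.drop start m) k).toNat
          = start + (PySem.Chars.find (List.drop start m) k).toNat := by omega
      have et2 : ((start : Int) + PySem.Chars.find (List.drop start m) k + (k.length : Int)).toNat
          = start + (PySem.Chars.find (List.drop start m) k).toNat + k.length := by omega
      rw [et, et2]
      have ecast : (start : Int) + PySem.Chars.find (List.drop start m) k + (k.length : Int)
          = ((start + (PySem.Chars.find (List.drop start m) k).toNat + k.length : Nat) : Int) := by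
        omega
      rw [ecast]
      rw [ih (start + (PySem.Chars.find (List.drop start m) k).toNat + k.length) _ (by omega) (by omega)]
      rw [List.foldl_cons]
      -- align the candidate and the pre/suffix arguments
      have ecand : List.take (start + (PySem.Chars.find (List.drop start m) k).toNat) m
          = List.take start m ++ List.take (PySem.Chars.find (List.drop start m) k).toNat (List.drop start m) :=
        List.take_add
      have edrop : List.drop ((PySem.Chars.find (List.drop start m) k).toNat + k.length) (List.drop start m)
          = List.drop (start + (PySem.Chars.find (List.drop start m) k).toNat + k.length) m := by
        rw [List.drop_drop]
        congr 1
        omega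
      have epre : List.take (start + (PySem.Chars.find (List.drop start m) k).toNat + k.length) m
          = List.take (start + (PySem.Chars.find (List.drop start m) k).toNat) m ++ k := by
        obtain ⟨t, ht⟩ := hpre
        have h2' : List.take k.length (List.drop (start + (PySem.Chars.find (List.drop start m) k).toNat) m) = k := by
          rw [← ht]
          exact List.take_left
        rw [List.take_add (i := start + (PySem.Chars.find (List.drop start m) k).toNat) (j := k.length), h2']
      rw [edrop, epre, ecand]

theorem pv_inner_eq (m k r : List Char) (hk : k ≠ []) (um : PySem.Set (List Char)) :
    (PySem.List.pyRange 1 ((pvSpl k m).length : Int) 1).foldl (fun um i =>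
        PySem.Set.add um
          (PySem.Chars.join k (PySem.List.slice (pvSpl k m) none (some i)) ++ r ++
           PySem.Chars.join k (PySem.List.slice (pvSpl k m) (some i) none))) um
      = pvFindLoop m k r um 0 (m.length + 1) := by
  have h0 : pvFindLoop m k r um ((0 : Nat) : Int) (m.length + 1)
      = List.foldl PySem.Set.add um (pvCands k r (List.take 0 m) (List.drop 0 m)) :=
    pvFindLoop_eq m k r hk (m.length + 1) 0 um (by omega) (by omega)
  simp only [Nat.cast_zero, List.take_zero, List.drop_zero] at h0
  rw [h0]
  rw [PySem.List.pyRange_one 1 ((pvSpl k m).length : Int), List.foldl_map]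
  have hn : (((pvSpl k m).length : Int) - 1).toNat = (pvSpl k m).length - 1 := by omega
  rw [hn]
  rw [List.foldl_ext _ (fun um (j : Nat) =>
      PySem.Set.add um
        (PySem.Chars.join k (List.take (j+1) (pvSpl k m)) ++ r ++
         PySem.Chars.join k (List.drop (j+1) (pvSpl k m)))) um ?_]
  · rw [← List.foldl_map
      (f := fun j => PySem.Chars.join k (List.take (j+1) (pvSpl k m)) ++ r ++
         PySem.Chars.join k (List.drop (j+1) (pvSpl k m)))
      (g := PySem.Set.add)]
    rw [pvA_eq k r hk m.length m le_rfl]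
  · intro a j hj
    have e1 : PySem.List.slice (pvSpl k m) none (some (1 + (j : Int)))
        = List.take (j+1) (pvSpl k m) := by
      rw [PySem.List.slice_to _ (by omega : (0:Int) ≤ 1 + (j : Int))]
      congr 1
      omega
    have e2 : PySem.List.slice (pvSpl k m) (some (1 + (j : Int))) none
        = List.drop (j+1) (pvSpl k m) := by
      rw [PySem.List.slice_from _ (by omega : (0:Int) ≤ 1 + (j : Int))]
      congr 1
      omega
    rw [e1, e2]

def pvAStep (m : List Char) (um : PySem.Set (List Char)) (kv : String × String) : PySem.Set (List Char) :=
  match PySem.Chars.split? m kv.1.toList with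
  | none => um
  | some split_by_key =>
      (PySem.List.pyRange 1 (split_by_key.length : Int) 1).foldl (fun um i =>
        let left_hand := PySem.Chars.join kv.1.toList (PySem.List.slice split_by_key none (some i))
        let right_hand := PySem.Chars.join kv.1.toList (PySem.List.slice split_by_key (some i) none)
        PySem.Set.add um (left_hand ++ kv.2.toList ++ right_hand)) um

theorem pv_outer_eq (m : List Char) :
    ∀ (reps : List (String × String)), (∀ p ∈ reps, p.1 ≠ "") → ∀ um,
      reps.foldl (pvAStep m) um
        = reps.foldl (fun um kv =>
            pvFindLoop m kv.1.toList kv.2.toList um 0 (m.length + 1)) um := by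
  intro reps
  induction reps with
  | nil => intro _ um; rfl
  | cons kv tl ih =>
    intro hpre um
    have hk : kv.1.toList ≠ [] := by
      have := hpre kv (List.mem_cons_self)
      simp [String.toList_eq_nil_iff, this]
    simp only [List.foldl_cons]
    rw [ih (fun p hp => hpre p (List.mem_cons_of_mem kv hp))]
    congr 1
    have hsplit : PySem.Chars.split? m kv.1.toList = some (pvSpl kv.1.toList m) := by
      simp [PySem.Chars.split?, List.isEmpty_iff, hk]
      rfl
    show pvAStep m um kv = _
    rw [pvAStep, hsplit]
    exact pv_inner_eq m kv.1.toList kv.2.toList hk um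

-- ===== VERDICT (by name: the statement is the Claim_ definition above) =====
theorem get_unique_molecules_spec : Claim_equal_get_unique_molecules := by
  intro molecule replacements _hdom hpre
  unfold Spec_get_unique_molecules get_unique_molecules get_unique_molecules_alt
  congr 1
  exact pv_outer_eq molecule.toList replacements hpre PySem.Set.empty
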